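-- pv_equiv track=rewrite | github.com/Alhajsalem/codewars_challenges | python/8kyu_remove_exclamation_marks.py | clean_string_1
-- ===== SOURCE A (Python) =====
-- def clean_string_1(s):
--     l = []
--     for x in s:
--         if x != "#":
--             l.append(x)
--         elif len(l) > 0:
--             l.pop()
--     return ''.join(l)
-- ===== SOURCE B (Python) =====
-- def clean_string_1(s):
--     out = []
--     skip = 0
--     for x in reversed(s):
--         if x == '#':
--             skip += 1
--         elif skip > 0:
--             skip -= 1
--         else:
--             out.append(x)
--     return ''.join(reversed(out))
-- ===== Notes on version B (the rewrite author's own statement) =====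
-- stated objective: alternative
-- what changed: Replaces the left-to-right stack with pop by a single right-to-left scan that keeps an integer skip counter and collects surviving characters, reversing them at the end.
import Mathlib
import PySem

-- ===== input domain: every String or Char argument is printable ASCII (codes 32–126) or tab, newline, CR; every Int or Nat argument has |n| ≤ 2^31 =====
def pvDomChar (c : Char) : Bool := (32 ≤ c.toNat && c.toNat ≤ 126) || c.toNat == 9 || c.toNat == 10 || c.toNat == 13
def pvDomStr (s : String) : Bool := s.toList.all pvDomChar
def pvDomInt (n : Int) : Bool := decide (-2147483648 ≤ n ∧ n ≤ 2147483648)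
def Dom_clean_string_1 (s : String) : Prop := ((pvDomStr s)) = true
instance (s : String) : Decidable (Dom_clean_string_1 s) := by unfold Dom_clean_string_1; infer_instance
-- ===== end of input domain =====

-- B replaces A's left-to-right stack (append/pop) by a right-to-left scan with a skip
-- counter, reversing the collected survivors at the end (alternative algorithm, same cost).

-- ===== PORT A =====
-- A's loop: stack l, append non-'#', pop on '#' if nonempty.
def cleanAuxA : List Char → List Char → List Char
  | acc, [] => acc
  | acc, x :: xs =>
    if x ≠ '#' then cleanAuxA (acc ++ [x]) xs
    else if acc.length > 0 then cleanAuxA acc.dropLast xs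
    else cleanAuxA acc xs

def clean_string_1 (s : String) : String := String.ofList (cleanAuxA [] s.toList)

-- ===== PORT B =====
-- one step of B's loop over reversed(s): state = (collected chars, skip counter)
def bStep (st : List Char × Nat) (x : Char) : List Char × Nat :=
  if x = '#' then (st.1, st.2 + 1)
  else if st.2 > 0 then (st.1, st.2 - 1)
  else (st.1 ++ [x], st.2)

def clean_string_1_alt (s : String) : String :=
  String.ofList ((s.toList.reverse.foldl bStep ([], 0)).1.reverse)

-- ===== PRECONDITION & SPEC =====
def Spec_clean_string_1 (s : String) (out : String) : Prop := out = clean_string_1_alt s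
instance (s : String) (out : String) : Decidable (Spec_clean_string_1 s out) := by unfold Spec_clean_string_1; infer_instance

-- ===== CLAIM (what is proved, stated in full; the proofs are below) =====
def Claim_equal_clean_string_1 : Prop := ∀ (s : String), Dom_clean_string_1 s → Spec_clean_string_1 s (clean_string_1 s)

-- ===== LEMMAS AND PROOFS =====

-- pending-skip count after processing a suffix (counted from the left recursion)
def bk : List Char → Nat
  | [] => 0
  | x :: xs => if x = '#' then bk xs + 1 else if bk xs > 0 then bk xs - 1 else bk xs

-- surviving characters of a suffix, in original order
def bres : List Char → List Char
  | [] => []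
  | x :: xs => if x = '#' then bres xs else if bk xs > 0 then bres xs else x :: bres xs

theorem foldr_bStep_char (l : List Char) :
    List.foldr (fun x st => bStep st x) ([], 0) l = ((bres l).reverse, bk l) := by
  induction l with
  | nil => simp [bres, bk]
  | cons x xs ih =>
    rw [List.foldr_cons, ih]
    by_cases hx : x = '#'
    · simp [bStep, bres, bk, hx]
    · by_cases hk : bk xs > 0 <;> simp [bStep, bres, bk, hx, hk]

theorem cleanAuxA_char (l : List Char) :
    ∀ acc : List Char, cleanAuxA acc l = acc.take (acc.length - bk l) ++ bres l := by
  induction l with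
  | nil => intro acc; simp [cleanAuxA, bres, bk]
  | cons x xs ih =>
    intro acc
    by_cases hx : x = '#'
    · subst hx
      by_cases hlen : acc.length > 0
      · have h1 : cleanAuxA acc ('#' :: xs) = cleanAuxA acc.dropLast xs := by
          simp [cleanAuxA, hlen]
        have hbk : bk ('#' :: xs) = bk xs + 1 := by simp [bk]
        have hbr : bres ('#' :: xs) = bres xs := by simp [bres]
        rw [h1, ih, hbk, hbr, List.dropLast_eq_take, List.take_take, List.length_take]
        congr 2
        omega
      · have hacc : acc = [] := by
          cases acc with
          | nil => rfl
          | cons a as => simp at hlen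
        subst hacc
        have h1 : cleanAuxA ([] : List Char) ('#' :: xs) = cleanAuxA [] xs := by
          simp [cleanAuxA]
        rw [h1, ih, bk, bres]
        simp
    · have h1 : cleanAuxA acc (x :: xs) = cleanAuxA (acc ++ [x]) xs := by
        simp [cleanAuxA, hx]
      rw [h1, ih]
      by_cases hk : bk xs > 0
      · have hbk : bk (x :: xs) = bk xs - 1 := by simp [bk, hx, hk]
        have hbr : bres (x :: xs) = bres xs := by simp [bres, hx, hk]
        rw [hbk, hbr]
        have ht : (acc ++ [x]).take (acc.length + 1 - bk xs) = acc.take (acc.length - (bk xs - 1)) := by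
          rcases Nat.lt_or_ge (bk xs) (acc.length + 1) with h | h
          · rw [List.take_append_of_le_length (by omega)]
            congr 1
            omega
          · have e1 : acc.length + 1 - bk xs = 0 := by omega
            have e2 : acc.length - (bk xs - 1) = 0 := by omega
            simp [e1, e2]
        simpa using ht
      · have hbk : bk (x :: xs) = 0 := by simp [bk, hx, hk]; omega
        have hbr : bres (x :: xs) = x :: bres xs := by simp [bres, hx, hk]
        have hk0 : bk xs = 0 := by omega
        rw [hbk, hbr, hk0]
        simp [List.take_of_length_le]

-- ===== VERDICT (by name: the statement is the Claim_ definition above) =====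
theorem clean_string_1_spec : Claim_equal_clean_string_1 := by
  intro s _
  unfold Spec_clean_string_1 clean_string_1 clean_string_1_alt
  rw [List.foldl_reverse]
  have : (List.foldr (fun x st => bStep st x) (([] : List Char), (0 : Nat)) s.toList) = ((bres s.toList).reverse, bk s.toList) := foldr_bStep_char _
  rw [this, cleanAuxA_char]
  simp
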